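-- pv_equiv track=rewrite | github.com/SakuraGo/leetcodepython3 | P3/Solu5168.py | f
-- ===== SOURCE A (Python) =====
-- def f(word):
--     temp = "{"
--     cnt = 0
--     for c in word:
--         if c == temp:
--             cnt+= 1
--         elif c<temp:
--             temp = c
--             cnt = 1
--
--     return cnt
-- ===== SOURCE B (Python) =====
-- def f(word):
--     m = "{"
--     for c in word:
--         if c < m:
--             m = c
--     n = 0
--     for c in word:
--         if c == m:
--             n += 1
--     return n
-- ===== Notes on version B (the rewrite author's own statement) =====
-- stated objective: simpler
-- what changed: Replaces A's fused single-pass min-tracking-with-reset-counter loop by two independent passes: one loop that only lowers the sentinel-initialized minimum, then a separate counting loop over the whole string.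
import Mathlib
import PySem

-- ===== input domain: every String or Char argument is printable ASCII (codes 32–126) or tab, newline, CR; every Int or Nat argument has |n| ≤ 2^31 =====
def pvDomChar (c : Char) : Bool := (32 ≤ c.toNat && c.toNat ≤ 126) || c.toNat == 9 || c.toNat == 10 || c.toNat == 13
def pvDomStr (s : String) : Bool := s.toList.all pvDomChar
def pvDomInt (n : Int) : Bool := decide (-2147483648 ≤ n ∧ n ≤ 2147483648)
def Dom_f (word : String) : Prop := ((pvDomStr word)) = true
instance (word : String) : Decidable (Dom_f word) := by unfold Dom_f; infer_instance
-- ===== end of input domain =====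

-- B replaces A's fused min-and-count loop by two separate passes (find min, then count); same cost.

-- ===== PORT A =====
-- A's single loop carrying (temp, cnt): equal char bumps cnt, smaller char resets temp and cnt.
def fLoop : List Char → Char → Int → Char × Int
  | [], temp, cnt => (temp, cnt)
  | c :: l, temp, cnt =>
      if c = temp then fLoop l temp (cnt + 1)
      else if c < temp then fLoop l c 1
      else fLoop l temp cnt

def f (word : String) : Int := (fLoop word.toList '{' 0).2

-- ===== PORT B =====
def f_alt (word : String) : Int :=
  let m := word.toList.foldl (fun m c => if c < m then c else m) '{'
  word.toList.foldl (fun n c => if c = m then n + 1 else n) 0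

-- ===== PRECONDITION & SPEC =====
def Spec_f (word : String) (out : Int) : Prop := out = f_alt word
instance (word : String) (out : Int) : Decidable (Spec_f word out) := by unfold Spec_f; infer_instance

-- ===== CLAIM (what is proved, stated in full; the proofs are below) =====
def Claim_equal_f : Prop := ∀ (word : String), Dom_f word → Spec_f word (f word)

-- ===== LEMMAS AND PROOFS =====

-- B's first pass never goes above its start value.
theorem foldlMin_le (l : List Char) (m : Char) :
    l.foldl (fun m c => if c < m then c else m) m ≤ m := by
  induction l generalizing m with
  | nil => exact le_refl m
  | cons c l ih =>
      simp only [List.foldl]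
      split
      · exact le_trans (ih c) (le_of_lt (by assumption))
      · exact ih m

-- B's second pass counts occurrences.
theorem foldlCount_eq (l : List Char) (m : Char) (n : Int) :
    l.foldl (fun n c => if c = m then n + 1 else n) n = n + (l.count m : Int) := by
  induction l generalizing n with
  | nil => simp
  | cons c l ih =>
      by_cases h : c = m
      · simp [List.foldl, h, ih, List.count_cons]; ring
      · simp [List.foldl, h, ih, List.count_cons, Ne.symm h]

-- Characterisation of A's loop: its counter is the count of the running minimum.
theorem fLoop_snd (l : List Char) (temp : Char) (cnt : Int) :
    (fLoop l temp cnt).2 =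
      if l.foldl (fun m c => if c < m then c else m) temp = temp
      then cnt + (l.count temp : Int)
      else (l.count (l.foldl (fun m c => if c < m then c else m) temp) : Int) := by
  induction l generalizing temp cnt with
  | nil => simp [fLoop]
  | cons c l ih =>
      by_cases hceq : c = temp
      · subst hceq
        simp only [fLoop, List.foldl, if_neg (lt_irrefl c), if_true]
        rw [ih]
        split
        · rw [List.count_cons_self]; push_cast; ring
        · next h =>
            have hne : ¬ c = l.foldl (fun m c => if c < m then c else m) c :=
              fun e => h e.symm
            simp [hne]
      · by_cases hlt : c < temp
        · simp only [fLoop, if_neg hceq, List.foldl, if_pos hlt]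
          rw [ih]
          have hle : l.foldl (fun m c => if c < m then c else m) c ≤ c := foldlMin_le l c
          have hne : l.foldl (fun m c => if c < m then c else m) c ≠ temp :=
            ne_of_lt (lt_of_le_of_lt hle hlt)
          rw [if_neg hne]
          split
          · next h => rw [h, List.count_cons_self]; push_cast; ring
          · next h =>
              have : ¬ c = l.foldl (fun m c => if c < m then c else m) c :=
                fun e => h e.symm
              simp [this]
        · have hgt : temp < c := lt_of_le_of_ne (le_of_not_gt hlt) (Ne.symm hceq)
          simp only [fLoop, if_neg hceq, List.foldl, if_neg hlt]
          rw [ih]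
          split
          · simp [hceq]
          · next h =>
              have hle : l.foldl (fun m c => if c < m then c else m) temp ≤ temp :=
                foldlMin_le l temp
              have : ¬ c = l.foldl (fun m c => if c < m then c else m) temp :=
                ne_of_gt (lt_of_le_of_lt hle hgt)
              simp [this]

-- ===== VERDICT (by name: the statement is the Claim_ definition above) =====
theorem f_spec : Claim_equal_f := by
  intro word _
  unfold Spec_f f f_alt
  rw [fLoop_snd, foldlCount_eq]
  split
  · next h => rw [h]
  · ring
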